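-- pv_equiv track=rewrite | github.com/KillianWasHere/103cipher | cypher.py | wrd_in_mtrx
-- ===== SOURCE A (Python) =====
-- def create_matrix(x, y):
--     return [[0 for j in range(x)] for i in range(y)]
--
-- def wrd_in_mtrx(string):
--     lenght = len(string)
--     k = 1
--
--     while (pow(k, 2) < lenght):
--         k += 1
--     mtrx = create_matrix(k, k)
--     idx = 0
--     for i in range(len(mtrx)):
--         for j in range(len(mtrx[i])):
--             if (idx < len(string)):
--                 mtrx[i][j] = ord(string[idx])
--                 idx += 1
--     return mtrx
-- ===== SOURCE B (Python) =====
-- def wrd_in_mtrx(string):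
--     k = 1
--     while (pow(k, 2) < len(string)):
--         k += 1
--     codes = [ord(c) for c in string]
--     codes += [0] * (k * k - len(codes))
--     return [codes[i * k:(i + 1) * k] for i in range(k)]
-- ===== Notes on version B (the rewrite author's own statement) =====
-- stated objective: faster
-- what changed: Replaces the zero-matrix preallocation plus idx-counter nested fill with a single flat pass building the code list, zero-padding it to k*k, and chunking it into k rows by slicing.
import Mathlib
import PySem

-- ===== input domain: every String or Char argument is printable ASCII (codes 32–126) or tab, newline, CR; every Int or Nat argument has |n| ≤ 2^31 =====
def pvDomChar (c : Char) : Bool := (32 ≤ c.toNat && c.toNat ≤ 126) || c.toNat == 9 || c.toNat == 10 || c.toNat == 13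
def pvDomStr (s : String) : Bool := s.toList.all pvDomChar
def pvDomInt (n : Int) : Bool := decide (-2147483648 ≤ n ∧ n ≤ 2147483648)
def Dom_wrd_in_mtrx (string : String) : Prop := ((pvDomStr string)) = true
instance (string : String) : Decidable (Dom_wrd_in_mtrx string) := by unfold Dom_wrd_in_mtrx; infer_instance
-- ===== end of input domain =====

-- B replaces A's zero-matrix preallocation + idx-counter nested fill by building the flat
-- code list once, zero-padding it to k*k, and chunking it into k rows by slicing (objective: alternative).

-- ===== PORT A =====

-- while (pow(k,2) < lenght): k += 1   (shared by both Pythons verbatim)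
def findK (lenght k : Nat) : Nat :=
  if k * k < lenght then findK lenght (k + 1) else k
termination_by lenght - k
decreasing_by
  have h2 : k ≤ k * k := by
    cases k with
    | zero => exact Nat.le_refl 0
    | succ m => exact Nat.le_mul_of_pos_left _ (Nat.succ_pos m)
  omega

-- create_matrix(x, y) = [[0 for j in range(x)] for i in range(y)]
def create_matrix (x y : Nat) : List (List Int) :=
  (List.range y).map (fun _ => (List.range x).map (fun _ => (0 : Int)))

-- body of the inner 'for j' loop of A: state is (mtrx, idx)
def stepA (chars : List Char) (i : Nat) (st : List (List Int) × Nat) (j : Nat) :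
    List (List Int) × Nat :=
  if st.2 < chars.length then
    (st.1.set i ((st.1.getD i []).set j ((chars.getD st.2 'a').toNat : Int)), st.2 + 1)
  else st

def wrd_in_mtrx (string : String) : List (List Int) :=
  let chars := string.toList
  let lenght := chars.length
  let k := findK lenght 1
  let mtrx := create_matrix k k
  let res := (List.range mtrx.length).foldl
    (fun st i => (List.range (st.1.getD i []).length).foldl (stepA chars i) st)
    (mtrx, 0)
  res.1

-- ===== PORT B =====
def wrd_in_mtrx_alt (string : String) : List (List Int) :=
  let chars := string.toList
  let k := findK chars.length 1
  let codes := chars.map (fun c => (c.toNat : Int))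
  let padded := codes ++ List.replicate (k * k - codes.length) 0
  (List.range k).map (fun i =>
    PySem.List.slice padded (some ((i * k : Nat) : Int)) (some (((i + 1) * k : Nat) : Int)))

-- ===== PRECONDITION & SPEC =====
def Spec_wrd_in_mtrx (string : String) (out : List (List Int)) : Prop := out = wrd_in_mtrx_alt string
instance (string : String) (out : List (List Int)) : Decidable (Spec_wrd_in_mtrx string out) := by unfold Spec_wrd_in_mtrx; infer_instance

-- ===== CLAIM (what is proved, stated in full; the proofs are below) =====
def Claim_equal_wrd_in_mtrx : Prop := ∀ (string : String), Dom_wrd_in_mtrx string → Spec_wrd_in_mtrx string (wrd_in_mtrx string)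

-- ===== LEMMAS AND PROOFS =====

theorem findK_sq (lenght k : Nat) : lenght ≤ findK lenght k * findK lenght k := by
  fun_induction findK with
  | case1 _ h ih => exact ih
  | case2 _ h => omega

-- abstract description of what the inner loop does to row i, positions j0..j0+c-1, reading idx..
def rowFill (chars : List Char) (row : List Int) (j0 idx c : Nat) : List Int :=
  match c with
  | 0 => row
  | c + 1 =>
    if idx < chars.length then
      rowFill chars (row.set j0 ((chars.getD idx 'a').toNat : Int)) (j0 + 1) (idx + 1) c
    else row

theorem rowFill_of_ge (chars : List Char) (row : List Int) (j0 idx c : Nat)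
    (h : chars.length ≤ idx) : rowFill chars row j0 idx c = row := by
  cases c with
  | zero => rfl
  | succ c => simp [rowFill, Nat.not_lt.mpr h]

theorem rowFill_length (chars : List Char) (row : List Int) (j0 idx c : Nat) :
    (rowFill chars row j0 idx c).length = row.length := by
  induction c generalizing row j0 idx with
  | zero => rfl
  | succ c ih =>
    simp only [rowFill]
    split
    · rw [ih]; simp
    · rfl

theorem rowFill_getD (chars : List Char) (c : Nat) : ∀ (row : List Int) (j0 idx t : Nat),
    j0 + c ≤ row.length →
    (rowFill chars row j0 idx c).getD t 0 =
      if j0 ≤ t ∧ t < j0 + c ∧ idx + (t - j0) < chars.length then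
        ((chars.getD (idx + (t - j0)) 'a').toNat : Int)
      else row.getD t 0 := by
  induction c with
  | zero => intro row j0 idx t h; simp [rowFill]; omega
  | succ c ih =>
    intro row j0 idx t h
    simp only [rowFill]
    by_cases hidx : idx < chars.length
    · rw [if_pos hidx, ih _ (j0+1) (idx+1) t (by simp; omega)]
      by_cases h1 : j0 + 1 ≤ t ∧ t < j0 + 1 + c ∧ idx + 1 + (t - (j0 + 1)) < chars.length
      · rw [if_pos h1, if_pos ⟨by omega, by omega, by omega⟩]
        have he : idx + 1 + (t - (j0 + 1)) = idx + (t - j0) := by omega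
        rw [he]
      · rw [if_neg h1]
        by_cases ht : t = j0
        · subst ht
          rw [if_pos ⟨le_refl _, by omega, by simpa using hidx⟩]
          rw [List.getD_eq_getElem _ _ (by simp; omega)]
          simp
        · rw [if_neg (by omega)]
          by_cases htl : t < row.length
          · rw [List.getD_eq_getElem _ _ (by simpa using htl),
                List.getD_eq_getElem _ _ htl]
            rw [List.getElem_set_ne (Ne.symm ht)]
          · rw [List.getD_eq_default _ _ (by simpa using htl),
                List.getD_eq_default _ _ (by omega)]
    · rw [if_neg hidx, if_neg (by omega)]

-- the inner 'for j' loop, over an arbitrary block of consecutive j's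
theorem inner_fold (chars : List Char) (i : Nat) (c : Nat) :
    ∀ (j0 : Nat) (m : List (List Int)) (idx : Nat), i < m.length →
    List.foldl (stepA chars i) (m, idx) (List.range' j0 c) =
      (m.set i (rowFill chars (m.getD i []) j0 idx c),
       idx + min c (chars.length - idx)) := by
  induction c with
  | zero =>
    intro j0 m idx hi
    rw [show List.range' j0 0 = [] from rfl, List.foldl_nil]
    refine Prod.ext ?_ ?_
    · show m = m.set i (m.getD i [])
      rw [List.getD_eq_getElem _ _ hi]
      exact (List.set_getElem_self ..).symm
    · show idx = idx + min 0 (chars.length - idx)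
      simp
  | succ c ih =>
    intro j0 m idx hi
    rw [List.range'_succ, List.foldl_cons]
    by_cases hidx : idx < chars.length
    · have hstep : stepA chars i (m, idx) j0 =
        (m.set i ((m.getD i []).set j0 ((chars.getD idx 'a').toNat : Int)), idx + 1) := by
        simp [stepA, hidx]
      rw [hstep, ih (j0+1) _ (idx+1) (by simpa using hi)]
      have hget : (m.set i ((m.getD i []).set j0 ((chars.getD idx 'a').toNat : Int))).getD i []
          = (m.getD i []).set j0 ((chars.getD idx 'a').toNat : Int) := by
        rw [List.getD_eq_getElem _ _ (by simpa using hi)]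
        simp
      rw [hget, List.set_set]
      refine Prod.ext ?_ ?_
      · simp only [rowFill, if_pos hidx]
      · simp; omega
    · have hstep : stepA chars i (m, idx) j0 = (m, idx) := by simp [stepA, hidx]
      rw [hstep, ih (j0+1) _ idx hi]
      have h1 : chars.length ≤ idx := by omega
      rw [rowFill_of_ge _ _ _ _ _ h1, rowFill_of_ge _ _ _ _ _ h1]
      simp; omega

-- the outer 'for i' loop
theorem outer_fold (chars : List Char) (k : Nat) (c : Nat) :
    ∀ (i0 : Nat) (m : List (List Int)) (idx : Nat),
    i0 + c ≤ m.length →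
    (∀ i, i0 ≤ i → i < i0 + c → (m.getD i []).length = k) →
    idx = min chars.length (i0 * k) →
    ∃ M, List.foldl (fun st i => (List.range (st.1.getD i []).length).foldl (stepA chars i) st)
          (m, idx) (List.range' i0 c) = (M, min chars.length ((i0 + c) * k)) ∧
      M.length = m.length ∧
      (∀ i, M.getD i [] =
        if i0 ≤ i ∧ i < i0 + c then
          rowFill chars (m.getD i []) 0 (min chars.length (i * k)) k
        else m.getD i []) := by
  induction c with
  | zero =>
    intro i0 m idx hlen hrows hidx
    exact ⟨m, by simpa using hidx ▸ rfl, rfl, fun i => by rw [if_neg (by omega)]⟩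
  | succ c ih =>
    intro i0 m idx hlen hrows hidx
    rw [List.range'_succ, List.foldl_cons]
    have hi0 : i0 < m.length := by omega
    have hrow0 : (m.getD i0 []).length = k := hrows i0 (le_refl _) (by omega)
    rw [List.range_eq_range', inner_fold chars i0 _ 0 m idx hi0, hrow0]
    set R := rowFill chars (m.getD i0 []) 0 idx k with hR
    have hlen' : i0 + 1 + c ≤ (m.set i0 R).length := by simp; omega
    have hrows' : ∀ i, i0 + 1 ≤ i → i < i0 + 1 + c → ((m.set i0 R).getD i []).length = k := by
      intro i h1 h2
      have hne : i0 ≠ i := by omega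
      by_cases hil : i < m.length
      · rw [List.getD_eq_getElem _ _ (by simpa using hil)]
        rw [List.getElem_set_ne hne]
        rw [← List.getD_eq_getElem _ _ hil]
        exact hrows i (by omega) (by omega)
      · omega
    have hidx' : idx + min k (chars.length - idx) = min chars.length ((i0 + 1) * k) := by
      have : (i0 + 1) * k = i0 * k + k := Nat.succ_mul i0 k
      omega
    rw [hidx']
    obtain ⟨M, hfold, hMlen, hMget⟩ := ih (i0 + 1) (m.set i0 R) _ hlen' hrows' rfl
    refine ⟨M, ?_, by simpa using hMlen, ?_⟩
    · rw [hfold]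
      have h : i0 + 1 + c = i0 + (c + 1) := by omega
      rw [h]
    · intro i
      rw [hMget i]
      by_cases h1 : i0 + 1 ≤ i ∧ i < i0 + 1 + c
      · rw [if_pos h1, if_pos ⟨by omega, by omega⟩]
        congr 1
        rw [List.getD_eq_getElem _ _ (by simp; omega), List.getElem_set_ne (by omega),
            ← List.getD_eq_getElem _ _ (by omega)]
      · rw [if_neg h1]
        by_cases h2 : i = i0
        · subst h2
          rw [if_pos ⟨le_refl _, by omega⟩, List.getD_eq_getElem _ _ (by simpa using hi0)]
          simp [hR, hidx]
        · rw [if_neg (by omega)]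
          by_cases hil : i < m.length
          · rw [List.getD_eq_getElem _ _ (by simpa using hil), List.getElem_set_ne (by omega),
                ← List.getD_eq_getElem _ _ hil]
          · rw [List.getD_eq_default _ _ (by simpa using hil), List.getD_eq_default _ _ (by omega)]

-- pointwise value of both sides: codes.getD (i*k+t) 0
theorem key (string : String) : wrd_in_mtrx string = wrd_in_mtrx_alt string := by
  set chars := string.toList with hchars
  set n := chars.length with hn
  set k := findK n 1 with hk
  have hnk : n ≤ k * k := findK_sq n 1
  -- evaluate port A
  have hmlen : (create_matrix k k).length = k := by simp [create_matrix]
  obtain ⟨M, hfold, hMlen, hMget⟩ :=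
    outer_fold chars k k 0 (create_matrix k k) 0 (by simp [hmlen])
      (fun i h1 h2 => by
        simp only [create_matrix]
        rw [List.getD_eq_getElem _ _ (by simpa [create_matrix] using h2)]
        simp)
      (by simp)
  have hA : wrd_in_mtrx string = M := by
    simp only [wrd_in_mtrx, ← hchars, ← hn, ← hk]
    rw [hmlen, List.range_eq_range', hfold]
  rw [hA]
  -- compare with port B, entry by entry
  set codes : List Int := chars.map (fun c => (c.toNat : Int)) with hcodes
  have hclen : codes.length = n := by simp [hcodes, hn]
  set padded : List Int := codes ++ List.replicate (k * k - codes.length) 0 with hpadded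
  have hplen : padded.length = k * k := by simp [hpadded, hclen]; omega
  have hnp : n ≤ padded.length := by rw [hplen]; exact hnk
  have hpget : ∀ t, padded.getD t 0 = codes.getD t 0 := by
    intro t
    by_cases h1 : t < n
    · rw [List.getD_eq_getElem _ _ (by omega), List.getD_eq_getElem _ _ (by omega)]
      rw [List.getElem_append_left (by omega)]
    · rw [List.getD_eq_default (l := codes) _ (by omega)]
      by_cases h2 : t < padded.length
      · rw [List.getD_eq_getElem _ _ h2]
        rw [List.getElem_append_right (by omega)]
        simp
      · rw [List.getD_eq_default _ _ (by omega)]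
  have hB : ∀ i, i < k → PySem.List.slice padded (some ((i * k : Nat) : Int))
      (some (((i + 1) * k : Nat) : Int)) = (padded.drop (i * k)).take k := by
    intro i hi
    rw [PySem.List.slice_natCast]
    congr 1
    have h : (i + 1) * k = i * k + k := Nat.succ_mul i k
    omega
  have hBlen : (wrd_in_mtrx_alt string).length = k := by
    simp only [wrd_in_mtrx_alt, ← hchars, ← hn, ← hk]
    simp
  apply List.ext_getElem (by rw [hMlen, hmlen, hBlen])
  intro i hi1 hi2
  have hik : i < k := by rwa [hMlen, hmlen] at hi1
  have hrowA : M[i] = rowFill chars ((List.range k).map (fun _ => (0 : Int))) 0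
      (min n (i * k)) k := by
    rw [← List.getD_eq_getElem _ _ hi1, hMget i, if_pos ⟨Nat.zero_le _, by omega⟩]
    congr 1
    simp only [create_matrix]
    rw [List.getD_eq_getElem _ _ (by simp; omega)]
    simp
  have hrowB : (wrd_in_mtrx_alt string)[i] = (padded.drop (i * k)).take k := by
    have : (wrd_in_mtrx_alt string)[i] = (wrd_in_mtrx_alt string).getD i [] := by
      rw [List.getD_eq_getElem _ _ hi2]
    rw [this]
    rw [List.getD_eq_getElem _ _ (by rw [hBlen]; exact hik)]
    simp only [wrd_in_mtrx_alt, ← hchars, ← hn, ← hk, ← hcodes, ← hpadded]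
    rw [List.getElem_map, List.getElem_range]
    exact hB i hik
  rw [hrowA, hrowB]
  have hikk : i * k + k ≤ padded.length := by
    rw [hplen]
    have h1 : (i + 1) * k = i * k + k := Nat.succ_mul i k
    have h2 : (i + 1) * k ≤ k * k := Nat.mul_le_mul_right k hik
    omega
  have hdlen : ((padded.drop (i * k)).take k).length = k := by
    simp; omega
  apply List.ext_getElem (by rw [rowFill_length, hdlen]; simp)
  intro t ht1 ht2
  have htk : t < k := by rwa [hdlen] at ht2
  rw [← List.getD_eq_getElem _ _ ht1, ← List.getD_eq_getElem _ _ ht2]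
  rw [rowFill_getD chars k _ 0 (min n (i * k)) t (by simp)]
  have hrhs : ((padded.drop (i * k)).take k).getD t 0 = padded.getD (i * k + t) 0 := by
    rw [List.getD_eq_getElem _ _ ht2]
    rw [List.getElem_take, List.getElem_drop]
    rw [List.getD_eq_getElem _ _ (by omega)]
  rw [hrhs, hpget]
  by_cases hc : 0 ≤ t ∧ t < 0 + k ∧ min n (i * k) + (t - 0) < n
  · rw [if_pos hc]
    have hmin : min n (i * k) = i * k := by omega
    have hlt : i * k + t < n := by omega
    rw [List.getD_eq_getElem codes _ (by omega)]
    simp only [hcodes, List.getElem_map]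
    have harg : min n (i * k) + (t - 0) = i * k + t := by omega
    rw [harg, ← List.getD_eq_getElem chars 'a' (by omega)]
  · rw [if_neg hc]
    have hge : ¬ (i * k + t < n) := by omega
    rw [List.getD_eq_default (l := codes) _ (by omega)]
    rw [List.getD_eq_getElem _ _ (by simpa using htk)]
    simp

-- ===== VERDICT (by name: the statement is the Claim_ definition above) =====
theorem wrd_in_mtrx_spec : Claim_equal_wrd_in_mtrx := by
  intro string _
  unfold Spec_wrd_in_mtrx
  exact key string
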